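-- pv_equiv track=rewrite | github.com/ariuk44/retake_exam_prep | day_15.py | isDaphne1
-- ===== SOURCE A (Python) =====
-- def isDaphne1(arr):
--     n = len(arr)
--     if n == 0:
--         return 0
--     start_even = 0
--     i = 0
--     while i < n and arr[i] % 2 == 0:
--         start_even += 1
--         i += 1
--     end_even = 0
--     i = n - 1
--     while i >= 0 and arr[i] % 2 == 0:
--         end_even += 1
--         i -= 1
--     has_odd = 0
--     for i in arr:
--         if i % 2 != 0:
--             has_odd = 1
--             break
--     return 1 if has_odd == 1 and start_even == end_even else 0
-- ===== SOURCE B (Python) =====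
-- def isDaphne1(arr):
--     idx = [i for i, x in enumerate(arr) if x % 2 != 0]
--     if not idx:
--         return 0
--     return 1 if idx[0] == len(arr) - 1 - idx[-1] else 0
-- ===== Notes on version B (the rewrite author's own statement) =====
-- stated objective: idiomatic
-- what changed: Replaces the two run-length while-scans plus a has_odd flag by a single odd-index representation: collect the indices of odd elements once and compare the first odd index with the distance of the last odd index from the end.
import Mathlib
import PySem

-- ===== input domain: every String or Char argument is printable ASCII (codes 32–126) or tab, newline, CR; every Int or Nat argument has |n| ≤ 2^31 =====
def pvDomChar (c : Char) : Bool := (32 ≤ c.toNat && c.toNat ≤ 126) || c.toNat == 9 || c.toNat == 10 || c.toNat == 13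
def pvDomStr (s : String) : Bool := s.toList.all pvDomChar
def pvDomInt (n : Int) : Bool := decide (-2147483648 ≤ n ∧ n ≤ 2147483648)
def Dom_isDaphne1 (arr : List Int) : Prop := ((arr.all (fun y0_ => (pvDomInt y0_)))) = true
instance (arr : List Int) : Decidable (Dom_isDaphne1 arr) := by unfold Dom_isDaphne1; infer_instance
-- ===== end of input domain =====

-- B replaces A's two run-length while-scans plus has_odd flag by the list of odd-element
-- indices, comparing the first odd index with the last odd index's distance from the end (idiomatic).

-- ===== PORT A =====
-- the front while loop: count leading elements with x % 2 == 0, stop at the first odd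
def pvLeadEven : List Int → Int
  | [] => 0
  | x :: xs => if PySem.Int.mod x 2 = 0 then 1 + pvLeadEven xs else 0

def isDaphne1 (arr : List Int) : Int :=
  let n : Int := arr.length
  if n = 0 then 0
  else
    let start_even := pvLeadEven arr
    -- the backward while loop scans from index n-1 down: the same scan over the reversed list
    let end_even := pvLeadEven arr.reverse
    -- the for loop with break: has_odd = 1 iff some element is odd
    let has_odd : Int := if arr.any (fun i => decide (PySem.Int.mod i 2 ≠ 0)) then 1 else 0
    if has_odd = 1 ∧ start_even = end_even then 1 else 0

-- ===== PORT B =====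
def isDaphne1_alt (arr : List Int) : Int :=
  let idx := ((PySem.List.enumerate arr).filter (fun p => decide (PySem.Int.mod p.2 2 ≠ 0))).map (fun p => p.1)
  match idx with
  | [] => 0
  | h :: t => if h = (arr.length : Int) - 1 - (h :: t).getLast (List.cons_ne_nil h t) then 1 else 0

-- ===== PRECONDITION & SPEC =====
def Spec_isDaphne1 (arr : List Int) (out : Int) : Prop := out = isDaphne1_alt arr
instance (arr : List Int) (out : Int) : Decidable (Spec_isDaphne1 arr out) := by unfold Spec_isDaphne1; infer_instance

-- ===== CLAIM (what is proved, stated in full; the proofs are below) =====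
def Claim_equal_isDaphne1 : Prop := ∀ (arr : List Int), Dom_isDaphne1 arr → Spec_isDaphne1 arr (isDaphne1 arr)

-- ===== LEMMAS AND PROOFS =====

-- the odd-index list of B, with a general start offset
def pvF (l : List Int) (s : Int) : List Int :=
  ((PySem.List.enumerate l s).filter (fun p => decide (PySem.Int.mod p.2 2 ≠ 0))).map (fun p => p.1)

theorem pvF_nil (s : Int) : pvF [] s = [] := by
  unfold pvF
  rw [PySem.List.enumerate_nil, List.filter_nil, List.map_nil]

theorem pvF_cons (x : Int) (xs : List Int) (s : Int) :
    pvF (x :: xs) s =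
      if PySem.Int.mod x 2 ≠ 0 then s :: pvF xs (s + 1) else pvF xs (s + 1) := by
  unfold pvF
  rw [PySem.List.enumerate_cons, List.filter_cons]
  by_cases hx : PySem.Int.mod x 2 ≠ 0
  · rw [if_pos hx]
    rw [show (decide (PySem.Int.mod (s, x).2 2 ≠ 0)) = true from decide_eq_true hx]
    rw [if_pos rfl, List.map_cons]
  · rw [if_neg hx]
    rw [show (decide (PySem.Int.mod (s, x).2 2 ≠ 0)) = false from decide_eq_false hx]
    rw [if_neg (by exact Bool.false_ne_true)]

theorem pvLeadEven_append (a b : List Int) :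
    pvLeadEven (a ++ b) =
      if a.any (fun i => decide (PySem.Int.mod i 2 ≠ 0)) then pvLeadEven a
      else (a.length : Int) + pvLeadEven b := by
  induction a with
  | nil =>
    rw [List.nil_append, List.any_nil, if_neg (by exact Bool.false_ne_true)]
    rw [List.length_nil]
    omega
  | cons x xs ih =>
    rw [List.cons_append]
    by_cases hx : PySem.Int.mod x 2 = 0
    · simp only [pvLeadEven]
      rw [if_pos hx, if_pos hx, ih, List.any_cons,
        show (decide (PySem.Int.mod x 2 ≠ 0)) = false from decide_eq_false (not_not_intro hx),
        Bool.false_or]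
      by_cases hxs : xs.any (fun i => decide (PySem.Int.mod i 2 ≠ 0)) = true
      · rw [if_pos hxs, if_pos hxs]
      · rw [if_neg hxs, if_neg hxs, List.length_cons]
        push_cast; ring
    · simp only [pvLeadEven]
      rw [if_neg hx, if_neg hx, List.any_cons,
        show (decide (PySem.Int.mod x 2 ≠ 0)) = true from decide_eq_true hx,
        Bool.true_or, if_pos rfl]

theorem pvF_eq_nil_iff (l : List Int) (s : Int) :
    pvF l s = [] ↔ l.any (fun i => decide (PySem.Int.mod i 2 ≠ 0)) = false := by
  induction l generalizing s with
  | nil => rw [pvF_nil, List.any_nil]; exact ⟨fun _ => rfl, fun _ => rfl⟩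
  | cons x xs ih =>
    rw [pvF_cons, List.any_cons]
    by_cases hx : PySem.Int.mod x 2 ≠ 0
    · rw [if_pos hx, show (decide (PySem.Int.mod x 2 ≠ 0)) = true from decide_eq_true hx,
        Bool.true_or]
      constructor
      · intro h; exact absurd h (List.cons_ne_nil _ _)
      · intro h; exact absurd h (by decide)
    · rw [if_neg hx, show (decide (PySem.Int.mod x 2 ≠ 0)) = false from decide_eq_false hx,
        Bool.false_or]
      exact ih (s + 1)

theorem pvF_head (l : List Int) (s h : Int) (t : List Int) (hF : pvF l s = h :: t) :
    h = s + pvLeadEven l := by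
  induction l generalizing s h t with
  | nil => rw [pvF_nil] at hF; simp at hF
  | cons x xs ih =>
    rw [pvF_cons] at hF
    by_cases hx : PySem.Int.mod x 2 ≠ 0
    · rw [if_pos hx] at hF
      injection hF with h1 _
      simp only [pvLeadEven]
      rw [if_neg hx]
      omega
    · rw [if_neg hx] at hF
      have := ih (s + 1) h t hF
      simp only [pvLeadEven]
      rw [if_pos (not_not.mp hx)]
      omega

theorem pvF_last (l : List Int) (s h : Int) (t : List Int) (hF : pvF l s = h :: t) :
    (h :: t).getLast (List.cons_ne_nil h t) = s + l.length - 1 - pvLeadEven l.reverse := by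
  induction l generalizing s h t with
  | nil => rw [pvF_nil] at hF; simp at hF
  | cons x xs ih =>
    rw [pvF_cons] at hF
    have hrev : (x :: xs).reverse = xs.reverse ++ [x] := by
      rw [List.reverse_cons]
    by_cases hxs : xs.any (fun i => decide (PySem.Int.mod i 2 ≠ 0)) = true
    · -- xs contains an odd element: the last odd index comes from xs
      obtain ⟨h', t', hF'⟩ : ∃ h' t', pvF xs (s + 1) = h' :: t' := by
        rcases hE : pvF xs (s + 1) with _ | ⟨h', t'⟩
        · rw [pvF_eq_nil_iff] at hE; rw [hE] at hxs
          exact absurd hxs (by exact Bool.false_ne_true)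
        · exact ⟨h', t', rfl⟩
      have hlast' := ih (s + 1) h' t' hF'
      have hle : pvLeadEven (x :: xs).reverse = pvLeadEven xs.reverse := by
        rw [hrev, pvLeadEven_append, if_pos (by rw [List.any_reverse]; exact hxs)]
      by_cases hx : PySem.Int.mod x 2 ≠ 0
      · rw [if_pos hx, hF'] at hF
        injection hF with h1 h2
        subst h1; subst h2
        rw [List.getLast_cons (List.cons_ne_nil h' t'), hlast', hle, List.length_cons]
        push_cast; ring
      · rw [if_neg hx, hF'] at hF
        injection hF with h1 h2
        subst h1; subst h2
        rw [hlast', hle, List.length_cons]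
        push_cast; ring
    · -- xs is all even: x is the only odd element
      have hxs' : xs.any (fun i => decide (PySem.Int.mod i 2 ≠ 0)) = false := by
        rwa [Bool.not_eq_true] at hxs
      have hnil : pvF xs (s + 1) = [] := (pvF_eq_nil_iff xs (s + 1)).2 hxs'
      have hx : PySem.Int.mod x 2 ≠ 0 := by
        by_contra hx
        rw [if_neg (not_not_intro hx), hnil] at hF
        simp at hF
      rw [if_pos hx, hnil] at hF
      injection hF with h1 h2
      subst h1; subst h2
      have hlerev : pvLeadEven (x :: xs).reverse = (xs.length : Int) := by
        rw [hrev, pvLeadEven_append,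
          if_neg (by rw [List.any_reverse, hxs']; exact Bool.false_ne_true)]
        simp only [pvLeadEven]
        rw [if_neg hx, List.length_reverse]
        omega
      rw [hlerev, List.getLast_singleton, List.length_cons]
      push_cast; ring

-- ===== VERDICT (by name: the statement is the Claim_ definition above) =====
theorem isDaphne1_spec : Claim_equal_isDaphne1 := by
  intro arr _
  unfold Spec_isDaphne1
  have halt : isDaphne1_alt arr = (match pvF arr 0 with
    | [] => (0 : Int)
    | h :: t => if h = (arr.length : Int) - 1 - (h :: t).getLast (List.cons_ne_nil h t) then 1 else 0) := rfl
  rcases hE : pvF arr 0 with _ | ⟨h, t⟩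
  · -- no odd element: both return 0
    rw [halt, hE]
    have hno := (pvF_eq_nil_iff arr 0).1 hE
    simp only [isDaphne1]
    by_cases hn : (arr.length : Int) = 0
    · rw [if_pos hn]
    · rw [if_neg hn, if_neg]
      rintro ⟨h01, -⟩
      rw [if_neg (by rw [hno]; exact Bool.false_ne_true)] at h01
      exact absurd h01 (by norm_num)
  · have hh := pvF_head arr 0 h t hE
    have hl := pvF_last arr 0 h t hE
    have hany : arr.any (fun i => decide (PySem.Int.mod i 2 ≠ 0)) = true := by
      by_cases hb : arr.any (fun i => decide (PySem.Int.mod i 2 ≠ 0)) = true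
      · exact hb
      · rw [(pvF_eq_nil_iff arr 0).2 (by rwa [Bool.not_eq_true] at hb)] at hE
        simp at hE
    have hne : arr ≠ [] := by
      rintro rfl; rw [pvF_nil] at hE; simp at hE
    have hn : (arr.length : Int) ≠ 0 := by
      intro h0
      exact hne (List.length_eq_zero_iff.mp (by exact_mod_cast h0))
    rw [halt, hE]
    simp only [isDaphne1]
    have hcond : ((if arr.any (fun i => decide (PySem.Int.mod i 2 ≠ 0)) then (1 : Int) else 0) = 1
          ∧ pvLeadEven arr = pvLeadEven arr.reverse)
        ↔ h = (arr.length : Int) - 1 - (h :: t).getLast (List.cons_ne_nil h t) := by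
      rw [if_pos hany, hl, hh]
      constructor
      · rintro ⟨-, he⟩; omega
      · intro he; exact ⟨rfl, by omega⟩
    rw [if_neg hn, if_congr hcond rfl rfl]
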